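-- pv_equiv track=rewrite | github.com/pypi-data/pypi-mirror-381 | packages/jupyter-ai-router/jupyter_ai_router-0.0.1-py3-none-any.whl/jupyter_ai_router/utils.py | get_first_word
-- ===== SOURCE A (Python) =====
-- from typing import Optional
--
-- def get_first_word(input_str: str) -> Optional[str]:
--     """
--     Finds the first word in a given string, ignoring leading whitespace.
--
--     Returns the first word, or None if there is no first word.
--     """
--     start = 0
--
--     # Skip leading whitespace
--     while start < len(input_str) and input_str[start].isspace():
--         start += 1
--
--     # Find end of first word
--     end = start
--     while end < len(input_str) and not input_str[end].isspace():
--         end += 1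
--
--     first_word = input_str[start:end]
--     return first_word if first_word else None
-- ===== SOURCE B (Python) =====
-- from typing import Optional
--
-- def get_first_word(input_str: str) -> Optional[str]:
--     """
--     Finds the first word in a given string, ignoring leading whitespace.
--
--     Returns the first word, or None if there is no first word.
--     """
--     parts = input_str.split(None, 1)
--     return parts[0] if parts else None
-- ===== Notes on version B (the rewrite author's own statement) =====
-- stated objective: idiomatic
-- what changed: Replaces the two manual index-tracking scan loops with str.split(None, 1) and taking the first element (or None when the list is empty).
import Mathlib
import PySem

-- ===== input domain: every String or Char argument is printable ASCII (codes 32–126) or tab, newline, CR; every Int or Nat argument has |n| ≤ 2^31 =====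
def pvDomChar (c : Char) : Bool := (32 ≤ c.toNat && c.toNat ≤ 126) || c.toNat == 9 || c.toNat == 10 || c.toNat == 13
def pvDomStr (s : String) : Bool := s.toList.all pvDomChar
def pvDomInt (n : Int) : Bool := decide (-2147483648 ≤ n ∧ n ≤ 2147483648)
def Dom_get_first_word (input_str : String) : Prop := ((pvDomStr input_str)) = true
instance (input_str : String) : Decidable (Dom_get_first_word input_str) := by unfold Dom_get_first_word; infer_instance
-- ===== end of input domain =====

-- B replaces A's two manual index-tracking scan loops with str.split(None, 1) + first element (idiomatic).


-- ===== PORT A =====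
-- first while loop: advance `start` past leading whitespace (here: drop the scanned prefix)
def gfwSkipLoop : List Char → List Char
  | [] => []
  | c :: rest => if PySem.Chars.isspace c then gfwSkipLoop rest else c :: rest

-- second while loop: advance `end` while not whitespace (here: collect input_str[start:end])
def gfwWordLoop : List Char → List Char
  | [] => []
  | c :: rest => if PySem.Chars.isspace c then [] else c :: gfwWordLoop rest

def get_first_word (input_str : String) : Option String :=
  let first_word := gfwWordLoop (gfwSkipLoop input_str.toList)
  if first_word = [] then none else some (String.ofList first_word)

-- ===== PORT B =====
def get_first_word_alt (input_str : String) : Option String :=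
  (PySem.Str.split₀Max input_str 1).head?

-- ===== PRECONDITION & SPEC =====
def Spec_get_first_word (input_str : String) (out : Option String) : Prop := out = get_first_word_alt input_str
instance (input_str : String) (out : Option String) : Decidable (Spec_get_first_word input_str out) := by unfold Spec_get_first_word; infer_instance

-- ===== CLAIM (what is proved, stated in full; the proofs are below) =====
def Claim_equal_get_first_word : Prop := ∀ (input_str : String), Dom_get_first_word input_str → Spec_get_first_word input_str (get_first_word input_str)

-- ===== LEMMAS AND PROOFS =====
theorem gfwSkipLoop_eq_dropWhile (l : List Char) :
    gfwSkipLoop l = l.dropWhile PySem.Chars.isspace := by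
  induction l with
  | nil => rfl
  | cons c rest ih =>
    simp only [gfwSkipLoop, List.dropWhile]
    by_cases h : PySem.Chars.isspace c <;> simp [h, ih]

theorem gfwWordLoop_eq_takeWhile (l : List Char) :
    gfwWordLoop l = l.takeWhile (fun c => !PySem.Chars.isspace c) := by
  induction l with
  | nil => rfl
  | cons c rest ih =>
    simp only [gfwWordLoop, List.takeWhile]
    by_cases h : PySem.Chars.isspace c <;> simp [h, ih]

theorem gfwDropWhileHeadFalse (p : Char → Bool) : ∀ (l : List Char) (c : Char) (cs : List Char),
    l.dropWhile p = c :: cs → p c = false := by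
  intro l
  induction l with
  | nil => intro c cs h; simp at h
  | cons a rest ih =>
    intro c cs h
    by_cases hp : p a
    · rw [List.dropWhile_cons_of_pos hp] at h; exact ih c cs h
    · rw [List.dropWhile_cons_of_neg hp] at h
      obtain ⟨rfl, _⟩ := List.cons.inj h
      simpa using hp

theorem head?_split₀Max_go_one (fuel : Nat) (l : List Char)
    (hf : l.length < fuel) :
    (PySem.Chars.split₀Max.go fuel 1 l []).head? =
      match l.dropWhile PySem.Chars.isspace with
      | [] => none
      | l' => some (l'.takeWhile (fun c => !PySem.Chars.isspace c)) := by
  obtain ⟨f, rfl⟩ : ∃ f, fuel = f + 1 := ⟨fuel - 1, by omega⟩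
  simp only [PySem.Chars.split₀Max.go]
  cases hdw : l.dropWhile PySem.Chars.isspace with
  | nil => rfl
  | cons c cs =>
    have hlen : cs.length < f := by
      have := List.length_dropWhile_le PySem.Chars.isspace l
      rw [hdw] at this; simp at this; omega
    obtain ⟨g, rfl⟩ : ∃ g, f = g + 1 := ⟨f - 1, by omega⟩
    simp only [PySem.Chars.split₀Max.go]
    cases (c :: cs).dropWhile (fun c => !PySem.Chars.isspace c) |>.dropWhile PySem.Chars.isspace with
    | nil => rfl
    | cons d ds => rfl

-- ===== VERDICT (by name: the statement is the Claim_ definition above) =====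
theorem get_first_word_spec : Claim_equal_get_first_word := by
  intro s _
  unfold Spec_get_first_word get_first_word get_first_word_alt
  simp only [PySem.Str.split₀Max, PySem.Chars.split₀Max, show ¬((1:Int) < 0) by norm_num,
    if_false, Int.toNat_one, List.head?_map]
  rw [head?_split₀Max_go_one (s.toList.length + 1) s.toList (by omega)]
  rw [gfwSkipLoop_eq_dropWhile, gfwWordLoop_eq_takeWhile]
  cases hdw : s.toList.dropWhile PySem.Chars.isspace with
  | nil => simp
  | cons c cs =>
    have hc : PySem.Chars.isspace c = false := gfwDropWhileHeadFalse _ _ _ _ hdw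
    simp [hc]
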